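-- pv_equiv track=rewrite | github.com/ulsmallzhou/Dice | dice-v1.0.py | standardization
-- ===== SOURCE A (Python) =====
-- def standardization(ipt: str) -> str:
--     # 默认输入为合法字符串
--     if ipt[0] == '-': ipt = '0' + ipt
--     if ipt[0] == 'd': ipt = '1' + ipt
--     if ipt[-1] == 'd': ipt = ipt + '100'
--     replace_0 = ['+d', '-d', '*d', '(d', 'd+', 'd-', 'd*', 'd)', '(-']
--     replace_1 = ['+1d', '-1d', '*1d', '(1d', 'd100+', 'd100-', 'd100*', 'd100)', '(0-']
--     for rid in range(len(replace_0)): ipt = ipt.replace(replace_0[rid], replace_1[rid])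
--     return ipt
-- ===== SOURCE B (Python) =====
-- def standardization(ipt: str) -> str:
--     # same leading/trailing guards as the original
--     if ipt[0] == '-': ipt = '0' + ipt
--     if ipt[0] == 'd': ipt = '1' + ipt
--     if ipt[-1] == 'd': ipt = ipt + '100'
--     # single left-to-right scan: context decided by the neighbouring
--     # characters of the guarded string, instead of nine replace passes
--     out = []
--     prev = None
--     n = len(ipt)
--     for i in range(n):
--         c = ipt[i]
--         nxt = ipt[i + 1] if i + 1 < n else None
--         if c == 'd':
--             if prev in ('+', '-', '*', '('):
--                 out.append('1')
--             out.append('d')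
--             if nxt in ('+', '-', '*', ')'):
--                 out.append('100')
--         elif c == '-' and prev == '(':
--             out.append('0-')
--         else:
--             out.append(c)
--         prev = c
--     return ''.join(out)
-- ===== Notes on version B (the rewrite author's own statement) =====
-- stated objective: alternative
-- what changed: Replaces the nine sequential str.replace passes by a single left-to-right scan of the guarded string that decides the inserted digit groups from each character's left and right neighbours.
import Mathlib
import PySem

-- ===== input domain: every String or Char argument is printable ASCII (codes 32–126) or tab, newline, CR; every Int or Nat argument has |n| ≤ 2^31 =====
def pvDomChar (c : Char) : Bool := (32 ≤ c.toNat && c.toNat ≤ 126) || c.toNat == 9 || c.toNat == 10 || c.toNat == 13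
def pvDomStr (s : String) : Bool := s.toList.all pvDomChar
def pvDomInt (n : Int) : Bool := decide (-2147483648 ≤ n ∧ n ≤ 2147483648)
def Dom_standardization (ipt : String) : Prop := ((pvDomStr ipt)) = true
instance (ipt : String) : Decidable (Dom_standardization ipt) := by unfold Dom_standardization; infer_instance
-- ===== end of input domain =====

-- B replaces A's nine sequential replace passes by one neighbour-context scan; equivalence proved on all non-empty inputs (A raises IndexError on "").

-- ===== PORT A =====
def standardization (ipt : String) : String :=
  let s0 := ipt.toList
  let s1 := if PySem.List.pyGet? s0 0 = some '-' then '0' :: s0 else s0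
  let s2 := if PySem.List.pyGet? s1 0 = some 'd' then '1' :: s1 else s1
  let s3 := if PySem.List.pyGet? s2 (-1) = some 'd' then s2 ++ ['1', '0', '0'] else s2
  let replace0 : List (List Char) :=
    [['+','d'], ['-','d'], ['*','d'], ['(','d'], ['d','+'], ['d','-'], ['d','*'], ['d',')'], ['(','-']]
  let replace1 : List (List Char) :=
    [['+','1','d'], ['-','1','d'], ['*','1','d'], ['(','1','d'],
     ['d','1','0','0','+'], ['d','1','0','0','-'], ['d','1','0','0','*'], ['d','1','0','0',')'], ['(','0','-']]
  let s4 := (List.zip replace0 replace1).foldl (fun acc pr => PySem.Chars.replace acc pr.1 pr.2) s3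
  String.ofList s4

-- ===== PORT B =====
-- the single scan of Source B: prev is the previous character (none at the start), the lookahead is the head of the rest
def scanB (prev : Option Char) (s : List Char) : List Char :=
  match s with
  | [] => []
  | c :: t =>
    (if c = 'd' then
      (if prev = some '+' ∨ prev = some '-' ∨ prev = some '*' ∨ prev = some '(' then ['1'] else [])
      ++ 'd' :: (if t.head? = some '+' ∨ t.head? = some '-' ∨ t.head? = some '*' ∨ t.head? = some ')' then ['1','0','0'] else [])
    else if c = '-' ∧ prev = some '(' then ['0', '-'] else [c]) ++ scanB (some c) t

def standardization_alt (ipt : String) : String :=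
  let s0 := ipt.toList
  let s1 := if PySem.List.pyGet? s0 0 = some '-' then '0' :: s0 else s0
  let s2 := if PySem.List.pyGet? s1 0 = some 'd' then '1' :: s1 else s1
  let s3 := if PySem.List.pyGet? s2 (-1) = some 'd' then s2 ++ ['1', '0', '0'] else s2
  String.ofList (scanB none s3)

-- ===== PRECONDITION & SPEC =====
-- Pre_ excludes only the empty string, on which A (and B) raise IndexError at ipt[0].
def Pre_standardization (ipt : String) : Prop := ipt ≠ ""
instance (ipt : String) : Decidable (Pre_standardization ipt) := by unfold Pre_standardization; infer_instance
def pvWitness_standardization : String := "2d6"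
def Spec_standardization (ipt : String) (out : String) : Prop := out = standardization_alt ipt
instance (ipt : String) (out : String) : Decidable (Spec_standardization ipt out) := by unfold Spec_standardization; infer_instance

-- ===== CLAIM (what is proved, stated in full; the proofs are below) =====
def Claim_equal_standardization : Prop := ∀ (ipt : String), Dom_standardization ipt → Pre_standardization ipt → Spec_standardization ipt (standardization ipt)

-- ===== LEMMAS AND PROOFS =====
-- naive two-char-pattern replacer
def Rstep (a b : Char) (r : List Char) : List Char → List Char
  | [] => []
  | c :: t => if c = a ∧ t.head? = some b then r ++ Rstep a b r t.tail else c :: Rstep a b r t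
termination_by s => s.length
decreasing_by
all_goals simp [List.length_tail]

theorem Rstep_nil (a b : Char) (r : List Char) : Rstep a b r [] = [] := by simp [Rstep]

theorem Rstep_pass (a b : Char) (r : List Char) (c : Char) (t : List Char)
    (h : ¬(c = a ∧ t.head? = some b)) : Rstep a b r (c :: t) = c :: Rstep a b r t := by
  rw [Rstep]; simp [h]

theorem Rstep_fire (a b : Char) (r : List Char) (t : List Char)
    (h : t.head? = some b) : Rstep a b r (a :: t) = r ++ Rstep a b r t.tail := by
  rw [Rstep]; simp [h]

theorem Rstep_head? (a b : Char) (r' : List Char) (s : List Char) :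
    (Rstep a b (a :: r') s).head? = s.head? := by
  cases s with
  | nil => simp [Rstep]
  | cons c t =>
    rw [Rstep]
    by_cases h : c = a ∧ t.head? = some b
    · simp [h]
    · simp [h]

theorem replace_go_eq (a b : Char) (r : List Char) :
    ∀ (fuel : Nat) (l acc : List Char), l.length ≤ fuel →
      PySem.Chars.replace.go [a, b] r fuel l acc = acc.reverse ++ Rstep a b r l := by
  intro fuel
  induction fuel with
  | zero =>
    intro l acc h
    have : l = [] := by cases l <;> simp_all
    subst this; simp [PySem.Chars.replace.go, Rstep_nil]
  | succ f ih =>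
    intro l acc h
    cases l with
    | nil => simp [PySem.Chars.replace.go, Rstep_nil]
    | cons c t =>
      rw [PySem.Chars.replace.go]
      by_cases hp : List.isPrefixOf [a, b] (c :: t)
      · have hc : c = a ∧ t.head? = some b := by
          cases t with
          | nil => simp [List.isPrefixOf] at hp
          | cons c2 t2 =>
            simp [List.isPrefixOf] at hp
            exact ⟨hp.1.symm, by simp [hp.2.symm]⟩
        rw [if_pos hp]
        have hl : (List.drop [a,b].length (c :: t)).length ≤ f := by
          simp at h ⊢; omega
        rw [ih _ _ hl]
        obtain ⟨c2, t2, rfl⟩ : ∃ c2 t2, t = c2 :: t2 := by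
          cases t with
          | nil => simp at hc
          | cons c2 t2 => exact ⟨c2, t2, rfl⟩
        rw [hc.1, Rstep_fire a b r _ hc.2]
        simp
      · rw [if_neg hp]
        have hl : t.length ≤ f := by simp at h; omega
        rw [ih _ _ hl]
        have hc : ¬(c = a ∧ t.head? = some b) := by
          intro ⟨h1, h2⟩
          cases t with
          | nil => simp at h2
          | cons c2 t2 =>
            simp at h2
            exact hp (by simp [List.isPrefixOf, h1, h2])
        rw [Rstep_pass a b r c t hc]
        simp

theorem replace_eq_Rstep (a b : Char) (r s : List Char) :
    PySem.Chars.replace s [a, b] r = Rstep a b r s := by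
  rw [PySem.Chars.replace]
  simp
  exact replace_go_eq a b r s.length s [] le_rfl

theorem Rstep_cons (a b : Char) (r : List Char) (c : Char) (t : List Char) :
    Rstep a b r (c :: t) = if c = a ∧ t.head? = some b then r ++ Rstep a b r t.tail else c :: Rstep a b r t := by
  rw [Rstep]

-- the composed nine-pass chain
def Cfun (s : List Char) : List Char :=
  Rstep '(' '-' ['(','0','-']
   (Rstep 'd' ')' ['d','1','0','0',')']
    (Rstep 'd' '*' ['d','1','0','0','*']
     (Rstep 'd' '-' ['d','1','0','0','-']
      (Rstep 'd' '+' ['d','1','0','0','+']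
       (Rstep '(' 'd' ['(','1','d']
        (Rstep '*' 'd' ['*','1','d']
         (Rstep '-' 'd' ['-','1','d']
          (Rstep '+' 'd' ['+','1','d'] s))))))))

theorem C1p (v : List Char) : Cfun ('d'::'+'::v) = 'd'::'1'::'0'::'0':: Cfun ('+'::v) := by
  by_cases hv : v.head? = some 'd'
  · obtain ⟨v', rfl⟩ : ∃ v', v = 'd' :: v' := by
      cases v with
      | nil => simp at hv
      | cons x xs => simp at hv; exact ⟨xs, by rw [hv]⟩
    simp [Cfun, Rstep_cons, Rstep_head?]
  · simp [Cfun, Rstep_cons, Rstep_head?, hv]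

theorem Cfun_nil : Cfun [] = [] := by simp [Cfun, Rstep_nil]

theorem Cfun_pass (c : Char) (t : List Char)
    (h1 : ¬(c = '+' ∧ t.head? = some 'd')) (h2 : ¬(c = '-' ∧ t.head? = some 'd'))
    (h3 : ¬(c = '*' ∧ t.head? = some 'd')) (h4 : ¬(c = '(' ∧ t.head? = some 'd'))
    (h5 : ¬(c = 'd' ∧ t.head? = some '+')) (h6 : ¬(c = 'd' ∧ t.head? = some '-'))
    (h7 : ¬(c = 'd' ∧ t.head? = some '*')) (h8 : ¬(c = 'd' ∧ t.head? = some ')'))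
    (h9 : ¬(c = '(' ∧ t.head? = some '-')) :
    Cfun (c :: t) = c :: Cfun t := by
  simp only [Cfun, Rstep_cons, Rstep_head?, if_neg h1, if_neg h2, if_neg h3, if_neg h4,
    if_neg h5, if_neg h6, if_neg h7, if_neg h8, if_neg h9]

theorem C1m (v : List Char) : Cfun ('d'::'-'::v) = 'd'::'1'::'0'::'0':: Cfun ('-'::v) := by
  by_cases hv : v.head? = some 'd'
  · obtain ⟨v', rfl⟩ : ∃ v', v = 'd' :: v' := by
      cases v with
      | nil => simp at hv
      | cons x xs => simp at hv; exact ⟨xs, by rw [hv]⟩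
    simp [Cfun, Rstep_cons, Rstep_head?]
  · simp [Cfun, Rstep_cons, Rstep_head?, hv]

theorem C1s (v : List Char) : Cfun ('d'::'*'::v) = 'd'::'1'::'0'::'0':: Cfun ('*'::v) := by
  by_cases hv : v.head? = some 'd'
  · obtain ⟨v', rfl⟩ : ∃ v', v = 'd' :: v' := by
      cases v with
      | nil => simp at hv
      | cons x xs => simp at hv; exact ⟨xs, by rw [hv]⟩
    simp [Cfun, Rstep_cons, Rstep_head?]
  · simp [Cfun, Rstep_cons, Rstep_head?, hv]

theorem C1r (v : List Char) : Cfun ('d'::')'::v) = 'd'::'1'::'0'::'0':: Cfun (')'::v) := by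
  simp [Cfun, Rstep_cons, Rstep_head?]

theorem C4p (v : List Char) : Cfun ('+'::'d'::v) = '+'::'1':: Cfun ('d'::v) := by
  simp [Cfun, Rstep_cons, Rstep_head?]

theorem C4m (v : List Char) : Cfun ('-'::'d'::v) = '-'::'1':: Cfun ('d'::v) := by
  simp [Cfun, Rstep_cons, Rstep_head?]

theorem C4s (v : List Char) : Cfun ('*'::'d'::v) = '*'::'1':: Cfun ('d'::v) := by
  simp [Cfun, Rstep_cons, Rstep_head?]

theorem C4l (v : List Char) : Cfun ('('::'d'::v) = '('::'1':: Cfun ('d'::v) := by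
  simp [Cfun, Rstep_cons, Rstep_head?]

theorem C5 (v : List Char) : Cfun ('('::'-'::v) = '('::'0':: Cfun ('-'::v) := by
  by_cases hv : v.head? = some 'd'
  · obtain ⟨v', rfl⟩ : ∃ v', v = 'd' :: v' := by
      cases v with
      | nil => simp at hv
      | cons x xs => simp at hv; exact ⟨xs, by rw [hv]⟩
    simp [Cfun, Rstep_cons, Rstep_head?]
  · simp [Cfun, Rstep_cons, Rstep_head?, hv]

theorem scanB_pass (prev : Option Char) (c : Char) (t : List Char)
    (hc : c ≠ 'd') (h : ¬(c = '-' ∧ prev = some '(')) :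
    scanB prev (c :: t) = c :: scanB (some c) t := by
  simp [scanB, hc, h]

theorem scanB_shift_d (prev : Option Char) (c : Char) (v : List Char)
    (hc : c = '+' ∨ c = '-' ∨ c = '*' ∨ c = '(') :
    scanB (some c) ('d' :: v) = '1' :: scanB none ('d' :: v) := by
  rcases hc with h | h | h | h <;> subst h <;> simp [scanB]

theorem scanB_shift_m (v : List Char) :
    scanB (some '(') ('-' :: v) = '0' :: scanB none ('-' :: v) := by
  simp [scanB]

theorem M : ∀ (n : Nat) (s : List Char) (prev : Option Char), s.length ≤ n →
    ¬((prev = some '+' ∨ prev = some '-' ∨ prev = some '*' ∨ prev = some '(') ∧ s.head? = some 'd') →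
    ¬(prev = some '(' ∧ s.head? = some '-') →
    Cfun s = scanB prev s := by
  intro n
  induction n with
  | zero =>
    intro s prev hlen _ _
    have hs : s = [] := by cases s <;> simp_all
    subst hs; simp [Cfun_nil, scanB]
  | succ n ih =>
    intro s prev hlen hA hB
    cases s with
    | nil => simp [Cfun_nil, scanB]
    | cons c t =>
      have hlent : t.length ≤ n := by simp at hlen; omega
      by_cases hd : c = 'd'
      · subst hd
        have hprev : ¬(prev = some '+' ∨ prev = some '-' ∨ prev = some '*' ∨ prev = some '(') := by
          intro h; exact hA ⟨h, by simp⟩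
        cases t with
        | nil =>
          rw [Cfun_pass 'd' [] (by simp) (by simp) (by simp) (by simp) (by simp) (by simp) (by simp) (by simp) (by simp)]
          simp [Cfun_nil, scanB, hprev]
        | cons x v =>
          by_cases hx : x = '+' ∨ x = '-' ∨ x = '*' ∨ x = ')'
          · have hrec : Cfun (x :: v) = scanB (some 'd') (x :: v) := by
              apply ih (x :: v) (some 'd') hlent
              · rintro ⟨h, -⟩; simp at h
              · rintro ⟨h, -⟩; simp at h
            have hscan : scanB prev ('d' :: x :: v) = 'd'::'1'::'0'::'0':: scanB (some 'd') (x :: v) := by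
              rcases hx with h | h | h | h <;> subst h <;> simp [scanB, hprev]
            rcases hx with h | h | h | h <;> subst h
            · rw [C1p, hrec, hscan]
            · rw [C1m, hrec, hscan]
            · rw [C1s, hrec, hscan]
            · rw [C1r, hrec, hscan]
          · push Not at hx
            obtain ⟨hx1, hx2, hx3, hx4⟩ := hx
            rw [Cfun_pass 'd' (x :: v) (by simp) (by simp) (by simp) (by simp)
              (by simp [hx1]) (by simp [hx2]) (by simp [hx3]) (by simp [hx4]) (by simp)]
            rw [ih (x :: v) (some 'd') hlent (by rintro ⟨h, -⟩; simp at h) (by rintro ⟨h, -⟩; simp at h)]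
            simp [scanB, hprev, hx1, hx2, hx3, hx4]
      · by_cases hld : t.head? = some 'd' ∧ (c = '+' ∨ c = '-' ∨ c = '*' ∨ c = '(')
        · obtain ⟨hth, hcl⟩ := hld
          obtain ⟨v, rfl⟩ : ∃ v, t = 'd' :: v := by
            cases t with
            | nil => simp at hth
            | cons y ys => simp at hth; exact ⟨ys, by rw [hth]⟩
          have hrec : Cfun ('d' :: v) = scanB none ('d' :: v) := by
            apply ih ('d' :: v) none hlent
            · rintro ⟨h, -⟩; simp at h
            · rintro ⟨h, -⟩; simp at h
          have hemit : scanB prev (c :: 'd' :: v) = c :: scanB (some c) ('d' :: v) := by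
            apply scanB_pass prev c _ hd
            rintro ⟨rfl, hp⟩
            exact hB ⟨hp, by simp⟩
          rw [hemit, scanB_shift_d (some c) c v hcl]
          rcases hcl with h | h | h | h <;> subst h
          · rw [C4p, hrec]
          · rw [C4m, hrec]
          · rw [C4s, hrec]
          · rw [C4l, hrec]
        · by_cases hpm : c = '(' ∧ t.head? = some '-'
          · obtain ⟨rfl, hth⟩ := hpm
            obtain ⟨v, rfl⟩ : ∃ v, t = '-' :: v := by
              cases t with
              | nil => simp at hth
              | cons y ys => simp at hth; exact ⟨ys, by rw [hth]⟩
            have hrec : Cfun ('-' :: v) = scanB none ('-' :: v) := by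
              apply ih ('-' :: v) none hlent
              · rintro ⟨h, -⟩; simp at h
              · rintro ⟨h, -⟩; simp at h
            rw [C5, hrec, scanB_pass prev '(' _ (by simp) (by simp), scanB_shift_m]
          · rw [Cfun_pass c t
              (by rintro ⟨rfl, h⟩; exact hld ⟨h, by simp⟩)
              (by rintro ⟨rfl, h⟩; exact hld ⟨h, by simp⟩)
              (by rintro ⟨rfl, h⟩; exact hld ⟨h, by simp⟩)
              (by rintro ⟨rfl, h⟩; exact hld ⟨h, by simp⟩)
              (by rintro ⟨rfl, -⟩; exact hd rfl)
              (by rintro ⟨rfl, -⟩; exact hd rfl)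
              (by rintro ⟨rfl, -⟩; exact hd rfl)
              (by rintro ⟨rfl, -⟩; exact hd rfl)
              (by rintro ⟨rfl, h⟩; exact hpm ⟨rfl, h⟩)]
            rw [ih t (some c) hlent
              (by rintro ⟨h, hh⟩; exact hld ⟨hh, by simpa using h⟩)
              (by rintro ⟨h, hh⟩; exact hpm ⟨by simpa using h, hh⟩)]
            exact (scanB_pass prev c t hd (by rintro ⟨rfl, hp⟩; exact hB ⟨hp, by simp⟩)).symm

theorem fold_eq_Cfun (s : List Char) :
    (List.zip
      [['+','d'], ['-','d'], ['*','d'], ['(','d'], ['d','+'], ['d','-'], ['d','*'], ['d',')'], ['(','-']]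
      [['+','1','d'], ['-','1','d'], ['*','1','d'], ['(','1','d'],
       ['d','1','0','0','+'], ['d','1','0','0','-'], ['d','1','0','0','*'], ['d','1','0','0',')'], ['(','0','-']]).foldl
      (fun acc pr => PySem.Chars.replace acc pr.1 pr.2) s = Cfun s := by
  simp [List.zip, List.foldl, replace_eq_Rstep, Cfun]

-- ===== VERDICT (by name: the statement is the Claim_ definition above) =====
theorem standardization_spec : Claim_equal_standardization := by
  intro ipt _ _
  unfold Spec_standardization standardization standardization_alt
  simp only [fold_eq_Cfun]
  congr 1
  exact M _ _ none le_rfl (by rintro ⟨h, -⟩; simp at h) (by rintro ⟨h, -⟩; simp at h)
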